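-- pv_equiv track=rewrite | github.com/miliar/Code_Jam_Webscraper | solutions_python/Problem_118/1392.py | fands
-- ===== SOURCE A (Python) =====
-- def palindrome(num):
--     if str(num)==str(num)[::-1]:
--         return True
--     else:
--         return False
--
-- def fands(range_values):
--     count=0
--     for i in range(range_values[0],range_values[1]):
--         b=palindrome(i)
--         if b:
--             c = palindrome(i*i)
--             if c:
--                 count=count+1
--     return count;
-- ===== SOURCE B (Python) =====
-- def fands(range_values):
--     lo = range_values[0]
--     hi = range_values[1]
--
--     def rev10(x):
--         r = 0
--         while x > 0:
--             r = r * 10 + x % 10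
--             x //= 10
--         return r
--
--     def hits(n):
--         if lo <= n and n < hi:
--             sq = n * n
--             return rev10(sq) == sq
--         return False
--
--     count = 1 if hits(0) else 0
--     H = 1
--     while H * H < hi:
--         H = H * 10
--     p = 1
--     while p < H:
--         for h in range(p, 10 * p):
--             if hits(rev10(h // 10) + h * p):
--                 count += 1
--             if hits(rev10(h) + h * 10 * p):
--                 count += 1
--         p = p * 10
--     return count
-- ===== Notes on version B (the rewrite author's own statement) =====
-- stated objective: alternative
-- what changed: B enumerates only palindromic candidates, built by mirroring each half-number h into an odd- and an even-length palindrome, and tests each candidate's square, instead of A's scan over every integer of the range; palindromicity is checked by arithmetic digit reversal instead of string comparison.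
import Mathlib
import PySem

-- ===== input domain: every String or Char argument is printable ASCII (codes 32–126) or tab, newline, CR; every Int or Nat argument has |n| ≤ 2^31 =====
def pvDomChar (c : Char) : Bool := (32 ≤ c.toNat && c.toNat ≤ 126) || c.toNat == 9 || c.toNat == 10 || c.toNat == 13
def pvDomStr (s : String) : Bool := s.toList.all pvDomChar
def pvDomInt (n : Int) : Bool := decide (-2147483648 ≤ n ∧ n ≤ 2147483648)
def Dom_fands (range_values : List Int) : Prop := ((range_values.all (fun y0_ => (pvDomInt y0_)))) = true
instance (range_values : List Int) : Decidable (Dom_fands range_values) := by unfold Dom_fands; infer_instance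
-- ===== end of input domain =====

-- B enumerates only palindromic candidates built by mirroring half-numbers and tests each,
-- instead of A's scan of the whole range; palindromes are detected by arithmetic digit reversal.

-- ===== PORT A =====
-- str(num) == str(num)[::-1]; the [::-1] slice has literal step -1, so slice? is never none
def palindromeA (num : Int) : Bool :=
  if PySem.Int.toStr num ==
      ((PySem.Str.slice? (PySem.Int.toStr num) none none (-1)).getD (PySem.Int.toStr num)) then
    true
  else
    false

def fands (range_values : List Int) : Int :=
  (PySem.List.pyRange (PySem.List.pyGetD range_values 0 0) (PySem.List.pyGetD range_values 1 0) 1).foldl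
    (fun count i =>
      let b := palindromeA i
      if b then
        let c := palindromeA (i * i)
        if c then count + 1 else count
      else count) 0

-- ===== PORT B =====
-- while x > 0: r = r*10 + x % 10; x //= 10
def revLoop (r x : Int) : Int :=
  if h : 0 < x then
    revLoop (r * 10 + PySem.Int.mod x 10) (PySem.Int.floordiv x 10)
  else r
termination_by x.toNat
decreasing_by
  have hd : PySem.Int.floordiv x 10 = x / 10 := PySem.Int.floordiv_eq_ediv_of_pos (by norm_num)
  rw [hd]; omega

def rev10 (x : Int) : Int := revLoop 0 x

-- hits(n): lo <= n < hi and n*n reads the same backwards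
def hitsB (lo hi n : Int) : Bool :=
  if lo ≤ n ∧ n < hi then
    (rev10 (n * n) == n * n)
  else false

-- while H * H < hi: H *= 10
def growH (hi H : Int) (hH : 0 < H) : Int :=
  if H * H < hi then growH hi (H * 10) (by positivity) else H
termination_by (hi - H).toNat
decreasing_by
  have h1 : H ≤ H * H := le_mul_of_one_le_left (by omega) (by omega)
  omega

-- while p < H: for h in range(p, 10*p): count the two mirrored candidates; p *= 10
def classLoop (lo hi H p count : Int) (hp : 0 < p) : Int :=
  if p < H then
    classLoop lo hi H (p * 10)
      ((PySem.List.pyRange p (10 * p) 1).foldl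
        (fun c h =>
          let c1 := if hitsB lo hi (rev10 (PySem.Int.floordiv h 10) + h * p) then c + 1 else c
          if hitsB lo hi (rev10 h + h * 10 * p) then c1 + 1 else c1) count)
      (by positivity)
  else count
termination_by (H - p).toNat
decreasing_by omega

def fands_alt (range_values : List Int) : Int :=
  let lo := PySem.List.pyGetD range_values 0 0
  let hi := PySem.List.pyGetD range_values 1 0
  let count : Int := if hitsB lo hi 0 then 1 else 0
  let H := growH hi 1 one_pos
  classLoop lo hi H 1 count one_pos

-- ===== PRECONDITION & SPEC =====
-- A raises IndexError when the list has fewer than two elements; Pre_ excludes exactly those.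
def Pre_fands (range_values : List Int) : Prop := 2 ≤ range_values.length
instance (range_values : List Int) : Decidable (Pre_fands range_values) := by unfold Pre_fands; infer_instance

def pvWitness_fands : List Int := [0, 50]

def Spec_fands (range_values : List Int) (out : Int) : Prop := out = fands_alt range_values
instance (range_values : List Int) (out : Int) : Decidable (Spec_fands range_values out) := by unfold Spec_fands; infer_instance

-- ===== CLAIM (what is proved, stated in full; the proofs are below) =====
def Claim_equal_fands : Prop := ∀ (range_values : List Int), Dom_fands range_values → Pre_fands range_values → Spec_fands range_values (fands range_values)

-- ===== LEMMAS AND PROOFS =====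

-- Nat-level decimal notions used by the proof
def revN (n : Nat) : Nat := Nat.ofDigits 10 (Nat.digits 10 n).reverse
def palN (n : Nat) : Bool := decide (Nat.digits 10 n = (Nat.digits 10 n).reverse)

-- candidates built from a half h with k+1 digits
def oddN (h k : Nat) : Nat := revN (h / 10) + h * 10 ^ k
def evenN (h k : Nat) : Nat := revN h + h * 10 ^ (k + 1)

-- Int-level candidate expressions as they occur in the port
def oddC (h p : Int) : Int := rev10 (PySem.Int.floordiv h 10) + h * p
def evenC (h p : Int) : Int := rev10 h + h * 10 * p

def classCands (p : Int) : List Int :=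
  (PySem.List.pyRange p (10 * p) 1).flatMap (fun h => [oddC h p, evenC h p])

def candList (H p : Int) : List Int :=
  if h : 1 ≤ p ∧ p < H then classCands p ++ candList H (p * 10) else []
termination_by (H - p).toNat
decreasing_by omega

lemma foldl_mul_add (L : List Nat) (r : Int) :
    L.foldl (fun (a : Int) (d : Nat) => a * 10 + (d : Int)) r
      = r * 10 ^ L.length + ((Nat.ofDigits 10 L.reverse : Nat) : Int) := by
  induction L generalizing r with
  | nil => simp
  | cons d L ih =>
    simp only [List.foldl_cons, List.reverse_cons, List.length_cons]
    rw [ih, Nat.ofDigits_append]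
    push_cast [Nat.ofDigits_singleton]
    simp only [List.length_reverse]
    ring

lemma revLoop_natCast (r : Int) (n : Nat) :
    revLoop r (n : Int) = (Nat.digits 10 n).foldl (fun (a : Int) (d : Nat) => a * 10 + (d : Int)) r := by
  induction n using Nat.strong_induction_on generalizing r with
  | _ n ih =>
    rw [revLoop]
    by_cases hn : 0 < (n : Int)
    · rw [dif_pos hn]
      have hn' : 0 < n := by exact_mod_cast hn
      have hm : PySem.Int.mod (n : Int) 10 = ((n % 10 : Nat) : Int) := by
        rw [PySem.Int.mod_eq_emod_of_pos (by norm_num)]; push_cast; rfl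
      have hf : PySem.Int.floordiv (n : Int) 10 = ((n / 10 : Nat) : Int) := by
        rw [PySem.Int.floordiv_eq_ediv_of_pos (by norm_num)]; push_cast; rfl
      rw [hm, hf, ih (n / 10) (Nat.div_lt_self hn' (by norm_num))]
      rw [Nat.digits_def' (by norm_num : (1:Nat) < 10) hn']
      simp
    · rw [dif_neg hn]
      have h0 : n = 0 := by omega
      subst h0; simp

lemma rev10_natCast (n : Nat) : rev10 (n : Int) = (revN n : Int) := by
  rw [rev10, revLoop_natCast, foldl_mul_add]
  simp [revN]

lemma revN_lt (n : Nat) : revN n < 10 ^ (Nat.digits 10 n).length := by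
  have := Nat.ofDigits_lt_base_pow_length (b := 10) (l := (Nat.digits 10 n).reverse)
    (by norm_num) (fun x hx => Nat.digits_lt_base (by norm_num) (List.mem_reverse.mp hx))
  simpa [revN] using this

lemma revN_eq_iff_palN (n : Nat) : revN n = n ↔ palN n = true := by
  constructor
  · intro h
    by_cases hn : n = 0
    · simp [palN, hn]
    have hn' : 0 < n := Nat.pos_of_ne_zero hn
    have hdig := Nat.digits_def' (by norm_num : (1:Nat) < 10) hn'
    by_cases hd : n % 10 = 0
    · exfalso
      have hlt : revN n < 10 ^ (Nat.digits 10 (n / 10)).length := by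
        rw [revN, hdig, hd, Nat.ofDigits_reverse_zero_cons]
        have := Nat.ofDigits_lt_base_pow_length (b := 10) (l := (Nat.digits 10 (n / 10)).reverse)
          (by norm_num) (fun x hx => Nat.digits_lt_base (by norm_num) (List.mem_reverse.mp hx))
        simpa using this
      have hle : 10 ^ ((Nat.digits 10 (n / 10)).length + 1) ≤ 10 * n := by
        have := Nat.base_pow_length_digits_le 10 n (by norm_num) hn
        rwa [hdig, List.length_cons] at this
      have : 10 ^ (Nat.digits 10 (n / 10)).length ≤ n := by
        rw [pow_succ] at hle; omega
      omega
    · have hdr : Nat.digits 10 (revN n) = (Nat.digits 10 n).reverse := by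
        apply Nat.digits_ofDigits 10 (by norm_num)
        · exact fun x hx => Nat.digits_lt_base (by norm_num) (List.mem_reverse.mp hx)
        · intro hne
          simp only [List.getLast_reverse]
          simp only [hdig, List.head_cons]
          exact hd
      rw [h] at hdr
      simp only [palN]
      exact decide_eq_true hdr
  · intro h
    have h' : Nat.digits 10 n = (Nat.digits 10 n).reverse := by simpa [palN] using h
    rw [revN, ← h', Nat.ofDigits_digits]

lemma digitChar_inj : ∀ a < 10, ∀ b < 10, Nat.digitChar a = Nat.digitChar b → a = b := by decide

lemma map_digitChar_inj (L1 L2 : List Nat) (h1 : ∀ d ∈ L1, d < 10) (h2 : ∀ d ∈ L2, d < 10)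
    (h : L1.map Nat.digitChar = L2.map Nat.digitChar) : L1 = L2 := by
  induction L1 generalizing L2 with
  | nil => cases L2 <;> simp_all
  | cons a L ih =>
    cases L2 with
    | nil => simp_all
    | cons b M =>
      simp only [List.map_cons, List.cons.injEq] at h
      have ha := h1 a (by simp)
      have hb := h2 b (by simp)
      have : a = b := digitChar_inj a ha b hb h.1
      subst this
      rw [ih M (fun d hd => h1 d (by simp [hd])) (fun d hd => h2 d (by simp [hd])) h.2]

lemma toDigitsCore_eq (fuel n : Nat) (acc : List Char) (hfuel : n < fuel) (hn : n ≠ 0) :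
    Nat.toDigitsCore 10 fuel n acc = ((Nat.digits 10 n).map Nat.digitChar).reverse ++ acc := by
  induction fuel generalizing n acc with
  | zero => omega
  | succ fuel ih =>
    rw [Nat.toDigitsCore]
    by_cases h10 : n / 10 = 0
    · simp only [h10, if_pos]
      have hd : Nat.digits 10 n = [n % 10] := by
        rw [Nat.digits_def' (by norm_num : (1:Nat) < 10) (Nat.pos_of_ne_zero hn), h10]
        simp
      rw [hd]
      simp
    · rw [if_neg h10]
      have hlt : n / 10 < fuel := by
        have : n / 10 < n := Nat.div_lt_self (Nat.pos_of_ne_zero hn) (by norm_num)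
        omega
      rw [ih (n / 10) _ hlt h10]
      rw [Nat.digits_def' (by norm_num : (1:Nat) < 10) (Nat.pos_of_ne_zero hn)]
      simp

lemma toDigits_eq (n : Nat) (hn : n ≠ 0) :
    Nat.toDigits 10 n = ((Nat.digits 10 n).map Nat.digitChar).reverse := by
  rw [Nat.toDigits, toDigitsCore_eq (n + 1) n [] (by omega) hn, List.append_nil]

lemma toDigits_ne_nil (n : Nat) : Nat.toDigits 10 n ≠ [] := by
  by_cases hn : n = 0
  · subst hn; decide
  · rw [toDigits_eq n hn]
    have : Nat.digits 10 n ≠ [] := Nat.digits_ne_nil_iff_ne_zero.mpr hn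
    simp_all

lemma mem_toDigits_ne_dash (n : Nat) (c : Char) (hc : c ∈ Nat.toDigits 10 n) : c ≠ '-' := by
  by_cases hn : n = 0
  · subst hn
    simp only [show Nat.toDigits 10 0 = ['0'] from rfl, List.mem_singleton] at hc
    subst hc; decide
  · rw [toDigits_eq n hn] at hc
    rw [List.mem_reverse, List.mem_map] at hc
    obtain ⟨d, hd, rfl⟩ := hc
    have : d < 10 := Nat.digits_lt_base (by norm_num) hd
    interval_cases d <;> decide

lemma palindromeA_eq (i : Int) : palindromeA i = (decide (0 ≤ i) && palN i.toNat) := by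
  have hopen : palindromeA i
      = decide (PySem.Int.toChars i = (PySem.Int.toChars i).reverse) := by
    have h1 : palindromeA i
        = decide (PySem.Int.toStr i = String.ofList (PySem.Int.toChars i).reverse) := by
      simp [palindromeA, PySem.Str.slice?_none_none_neg_one]
    rw [h1, decide_eq_decide, ← String.toList_inj, PySem.Int.toList_toStr, String.toList_ofList]
  rw [hopen]
  by_cases hi : 0 ≤ i
  · have hch : PySem.Int.toChars i = Nat.toDigits 10 i.toNat := by
      simp only [PySem.Int.toChars, if_neg (by omega : ¬ i < 0)]
    rw [hch]
    by_cases hz : i.toNat = 0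
    · rw [hz]
      simp [hi, palN]
    · rw [toDigits_eq _ hz]
      simp only [List.reverse_reverse, hi, decide_true, Bool.true_and, palN]
      rw [decide_eq_decide, ← List.map_reverse, eq_comm]
      constructor
      · exact fun hmap => map_digitChar_inj _ _
          (fun d hd => Nat.digits_lt_base (by norm_num) hd)
          (fun d hd => Nat.digits_lt_base (by norm_num) (List.mem_reverse.mp hd)) hmap
      · intro hb
        conv_lhs => rw [hb]
  · have hch : PySem.Int.toChars i = '-' :: Nat.toDigits 10 i.natAbs := by
      simp only [PySem.Int.toChars, if_pos (by omega : i < 0)]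
    rw [hch]
    simp only [hi, decide_false, Bool.false_and]
    rw [decide_eq_false_iff_not]
    intro hpal
    obtain ⟨d, D, hD⟩ := List.exists_cons_of_ne_nil
      (List.reverse_ne_nil_iff.mpr (toDigits_ne_nil i.natAbs))
    rw [List.reverse_cons, hD] at hpal
    have hhead : '-' = d := by
      have := congrArg (fun l => l.head?) hpal
      simpa using this
    have hmem : d ∈ (Nat.toDigits 10 i.natAbs).reverse := by rw [hD]; simp
    exact mem_toDigits_ne_dash i.natAbs d (List.mem_reverse.mp hmem) hhead.symm

lemma hitsB_eq (lo hi n : Int) :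
    hitsB lo hi n = (decide (lo ≤ n) && decide (n < hi) && palN (n * n).toNat) := by
  unfold hitsB
  by_cases h : lo ≤ n ∧ n < hi
  · rw [if_pos h]
    have hsq : (0 : Int) ≤ n * n := mul_self_nonneg n
    have hcast : n * n = (((n * n).toNat : Nat) : Int) := (Int.toNat_of_nonneg hsq).symm
    rw [hcast, rev10_natCast]
    simp only [h.1, h.2, decide_true, Bool.true_and, Int.toNat_natCast]
    rcases Bool.eq_false_or_eq_true (palN (n * n).toNat) with hb | hb <;> rw [hb]
    · rw [beq_iff_eq]
      exact_mod_cast congrArg (fun m : Nat => (m : Int)) ((revN_eq_iff_palN _).mpr hb)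
    · rw [beq_eq_false_iff_ne]
      intro heq
      have h2 : revN (n * n).toNat = (n * n).toNat := by exact_mod_cast heq
      rw [revN_eq_iff_palN] at h2
      simp [h2] at hb
  · rw [if_neg h]
    by_cases hlo : lo ≤ n
    · have hhi : ¬ n < hi := fun hh => h ⟨hlo, hh⟩
      simp [hlo, hhi]
    · simp [hlo]

-- A's loop is a countP over the range
lemma fands_eq_countP (range_values : List Int) :
    fands range_values =
      ((PySem.List.pyRange (PySem.List.pyGetD range_values 0 0)
          (PySem.List.pyGetD range_values 1 0) 1).countP
        (fun i => palindromeA i && palindromeA (i * i)) : Int) := by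
  unfold fands
  have hfun : (fun (count : Int) i =>
      let b := palindromeA i
      if b then
        let c := palindromeA (i * i)
        if c then count + 1 else count
      else count)
      = fun (count : Int) i =>
          if (fun j => palindromeA j && palindromeA (j * j)) i = true then count + 1 else count := by
    funext count i
    rcases Bool.eq_false_or_eq_true (palindromeA i) with hb | hb <;>
      rcases Bool.eq_false_or_eq_true (palindromeA (i * i)) with hc | hc <;>
      simp [hb, hc]
  rw [hfun, PySem.List.foldl_count_if]
  simp

-- B's loop is a countP over the candidate list
lemma foldl_two_if (lo hi p : Int) (l : List Int) (c0 : Int) :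
    l.foldl (fun c h =>
      let c1 := if hitsB lo hi (rev10 (PySem.Int.floordiv h 10) + h * p) then c + 1 else c
      if hitsB lo hi (rev10 h + h * 10 * p) then c1 + 1 else c1) c0
    = c0 + ((l.flatMap (fun h => [oddC h p, evenC h p])).countP (hitsB lo hi) : Int) := by
  induction l generalizing c0 with
  | nil => simp
  | cons a l ih =>
    simp only [List.foldl_cons, List.flatMap_cons, List.cons_append, List.nil_append]
    rw [ih, List.countP_cons, List.countP_cons]
    rcases Bool.eq_false_or_eq_true (hitsB lo hi (oddC a p)) with h1 | h1 <;>
      rcases Bool.eq_false_or_eq_true (hitsB lo hi (evenC a p)) with h2 | h2 <;>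
      simp only [oddC, evenC] at h1 h2 ⊢ <;>
      simp only [h1, h2, if_true, if_false, ite_true, ite_false] <;>
      push_cast <;> ring

lemma classLoop_eq (lo hi H p count : Int) (hp : 0 < p) :
    classLoop lo hi H p count hp = count + ((candList H p).countP (hitsB lo hi) : Int) := by
  rw [classLoop, candList]
  by_cases hcond : p < H
  · rw [if_pos hcond, dif_pos ⟨by omega, hcond⟩]
    rw [classLoop_eq lo hi H (p * 10) _ (by positivity), foldl_two_if]
    simp only [classCands, List.countP_append]
    push_cast
    ring
  · rw [if_neg hcond, dif_neg (by omega)]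
    simp
termination_by (H - p).toNat
decreasing_by omega

lemma growH_spec (hi H : Int) (hH : 0 < H) :
    (∃ k : Nat, growH hi H hH = H * 10 ^ k) ∧ hi ≤ growH hi H hH * growH hi H hH := by
  rw [growH]
  by_cases hc : H * H < hi
  · rw [if_pos hc]
    obtain ⟨⟨k, hk⟩, hle⟩ := growH_spec hi (H * 10) (by positivity)
    exact ⟨⟨k + 1, by rw [hk]; ring⟩, hle⟩
  · rw [if_neg hc]
    exact ⟨⟨0, by ring⟩, not_lt.mp hc⟩
termination_by (hi - H).toNat
decreasing_by
  have h1 : H ≤ H * H := le_mul_of_one_le_left (by omega) (by omega)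
  omega

lemma digits_len_of_range (h k : Nat) (h1 : 10 ^ k ≤ h) (h2 : h < 10 ^ (k + 1)) :
    (Nat.digits 10 h).length = k + 1 := by
  have h0 : h ≠ 0 := by
    have : 0 < 10 ^ k := Nat.pow_pos (by norm_num)
    omega
  have hA : h < 10 ^ (Nat.digits 10 h).length := Nat.lt_base_pow_length_digits (by norm_num)
  have hB : 10 ^ (Nat.digits 10 h).length ≤ 10 * h := Nat.base_pow_length_digits_le 10 h (by norm_num) h0
  have hk1 : k < (Nat.digits 10 h).length := by
    have : (10:Nat) ^ k < 10 ^ (Nat.digits 10 h).length := lt_of_le_of_lt h1 hA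
    exact (Nat.pow_lt_pow_iff_right (by norm_num)).mp this
  have hk2 : (Nat.digits 10 h).length < k + 2 := by
    have : (10:Nat) ^ (Nat.digits 10 h).length < 10 ^ (k + 2) := by
      calc (10:Nat) ^ (Nat.digits 10 h).length ≤ 10 * h := hB
        _ < 10 * 10 ^ (k + 1) := by omega
        _ = 10 ^ (k + 2) := by ring
    exact (Nat.pow_lt_pow_iff_right (by norm_num)).mp this
  omega

lemma digits_len_div10 (h k : Nat) (h1 : 10 ^ k ≤ h) (h2 : h < 10 ^ (k + 1)) :
    (Nat.digits 10 (h / 10)).length = k := by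
  cases k with
  | zero =>
    have : h / 10 = 0 := by omega
    simp [this]
  | succ k =>
    have ha : 10 ^ (k + 1) ≤ h / 10 * 10 + 9 := by omega
    have hlow : 10 ^ k ≤ h / 10 := by
      have hp : 0 < (10:Nat) ^ k := Nat.pow_pos (by norm_num)
      have := Nat.pow_succ 10 k
      omega
    have hhigh : h / 10 < 10 ^ (k + 1) := by
      have := Nat.pow_succ 10 (k + 1)
      omega
    exact digits_len_of_range _ _ hlow hhigh

lemma digits_ne_nil_of_range (h k : Nat) (h1 : 10 ^ k ≤ h) : h ≠ 0 := by
  have : 0 < (10:Nat) ^ k := Nat.pow_pos (by norm_num)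
  omega

lemma digits_candAux (h k : Nat) (T : List Nat) (hTlen : T.length = k)
    (hTall : ∀ d ∈ T, d < 10) (hh : h ≠ 0) :
    Nat.digits 10 (Nat.ofDigits 10 T.reverse + h * 10 ^ k) = T.reverse ++ Nat.digits 10 h := by
  have hval : Nat.ofDigits 10 (T.reverse ++ Nat.digits 10 h)
      = Nat.ofDigits 10 T.reverse + h * 10 ^ k := by
    rw [Nat.ofDigits_append, List.length_reverse, hTlen, Nat.ofDigits_digits]
    ring
  rw [← hval]
  apply Nat.digits_ofDigits 10 (by norm_num)
  · intro l hl
    rcases List.mem_append.mp hl with hl | hl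
    · exact hTall l (List.mem_reverse.mp hl)
    · exact Nat.digits_lt_base (by norm_num) hl
  · intro hne
    rw [List.getLast_append_of_ne_nil hne (Nat.digits_ne_nil_iff_ne_zero.mpr hh)]
    exact Nat.getLast_digit_ne_zero 10 hh

lemma digits_oddN (h k : Nat) (h1 : 10 ^ k ≤ h) (h2 : h < 10 ^ (k + 1)) :
    Nat.digits 10 (oddN h k) = (Nat.digits 10 (h / 10)).reverse ++ Nat.digits 10 h := by
  rw [oddN, revN]
  exact digits_candAux h k _ (digits_len_div10 h k h1 h2)
    (fun d hd => Nat.digits_lt_base (by norm_num) hd)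
    (digits_ne_nil_of_range h k h1)

lemma digits_evenN (h k : Nat) (h1 : 10 ^ k ≤ h) (h2 : h < 10 ^ (k + 1)) :
    Nat.digits 10 (evenN h k) = (Nat.digits 10 h).reverse ++ Nat.digits 10 h := by
  rw [evenN, revN]
  exact digits_candAux h (k + 1) _ (digits_len_of_range h k h1 h2)
    (fun d hd => Nat.digits_lt_base (by norm_num) hd)
    (digits_ne_nil_of_range h k h1)

lemma palN_oddN (h k : Nat) (h1 : 10 ^ k ≤ h) (h2 : h < 10 ^ (k + 1)) :
    palN (oddN h k) = true := by
  rw [palN, decide_eq_true_eq, digits_oddN h k h1 h2]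
  have hh : 0 < h := by
    have : 0 < (10:Nat) ^ k := Nat.pow_pos (by norm_num)
    omega
  rw [Nat.digits_def' (by norm_num : (1:Nat) < 10) hh]
  simp [List.reverse_append]

lemma palN_evenN (h k : Nat) (h1 : 10 ^ k ≤ h) (h2 : h < 10 ^ (k + 1)) :
    palN (evenN h k) = true := by
  rw [palN, decide_eq_true_eq, digits_evenN h k h1 h2]
  simp [List.reverse_append]

lemma oddN_bounds (h k : Nat) (h1 : 10 ^ k ≤ h) (h2 : h < 10 ^ (k + 1)) :
    10 ^ (2 * k) ≤ oddN h k ∧ oddN h k < 10 ^ (2 * k + 1) := by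
  have hrev : revN (h / 10) < 10 ^ k := by
    have := revN_lt (h / 10)
    rwa [digits_len_div10 h k h1 h2] at this
  constructor
  · calc (10:Nat) ^ (2 * k) = 10 ^ k * 10 ^ k := by ring
      _ ≤ h * 10 ^ k := Nat.mul_le_mul_right _ h1
      _ ≤ oddN h k := Nat.le_add_left _ _
  · calc oddN h k < 10 ^ k + h * 10 ^ k := by rw [oddN]; omega
      _ = (h + 1) * 10 ^ k := by ring
      _ ≤ 10 ^ (k + 1) * 10 ^ k := Nat.mul_le_mul_right _ (by omega)
      _ = 10 ^ (2 * k + 1) := by ring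

lemma evenN_bounds (h k : Nat) (h1 : 10 ^ k ≤ h) (h2 : h < 10 ^ (k + 1)) :
    10 ^ (2 * k + 1) ≤ evenN h k ∧ evenN h k < 10 ^ (2 * k + 2) := by
  have hrev : revN h < 10 ^ (k + 1) := by
    have := revN_lt h
    rwa [digits_len_of_range h k h1 h2] at this
  constructor
  · calc (10:Nat) ^ (2 * k + 1) = 10 ^ k * 10 ^ (k + 1) := by ring
      _ ≤ h * 10 ^ (k + 1) := Nat.mul_le_mul_right _ h1
      _ ≤ evenN h k := Nat.le_add_left _ _
  · calc evenN h k < 10 ^ (k + 1) + h * 10 ^ (k + 1) := by rw [evenN]; omega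
      _ = (h + 1) * 10 ^ (k + 1) := by ring
      _ ≤ 10 ^ (k + 1) * 10 ^ (k + 1) := Nat.mul_le_mul_right _ (by omega)
      _ = 10 ^ (2 * k + 2) := by ring

lemma oddN_div (h k : Nat) (h1 : 10 ^ k ≤ h) (h2 : h < 10 ^ (k + 1)) :
    oddN h k / 10 ^ k = h := by
  have hrev : revN (h / 10) < 10 ^ k := by
    have := revN_lt (h / 10)
    rwa [digits_len_div10 h k h1 h2] at this
  rw [oddN, Nat.add_mul_div_right _ _ (Nat.pow_pos (by norm_num)),
    Nat.div_eq_of_lt hrev, Nat.zero_add]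

lemma evenN_div (h k : Nat) (h1 : 10 ^ k ≤ h) (h2 : h < 10 ^ (k + 1)) :
    evenN h k / 10 ^ (k + 1) = h := by
  have hrev : revN h < 10 ^ (k + 1) := by
    have := revN_lt h
    rwa [digits_len_of_range h k h1 h2] at this
  rw [evenN, Nat.add_mul_div_right _ _ (Nat.pow_pos (by norm_num)),
    Nat.div_eq_of_lt hrev, Nat.zero_add]

lemma pal_surj (n : Nat) (hn : 0 < n) (hpal : palN n = true) :
    ∃ k h, 10 ^ k ≤ h ∧ h < 10 ^ (k + 1) ∧ (n = oddN h k ∨ n = evenN h k) := by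
  have hrev : Nat.digits 10 n = (Nat.digits 10 n).reverse := of_decide_eq_true hpal
  set L := Nat.digits 10 n with hL
  have hLne : L ≠ [] := Nat.digits_ne_nil_iff_ne_zero.mpr (by omega)
  set d := L.length with hd
  have hd1 : 1 ≤ d := by
    rw [hd]
    exact List.length_pos_of_ne_nil hLne
  set m := (d + 1) / 2 with hm
  have hm1 : 1 ≤ m := by omega
  have hmd : m ≤ d := by omega
  set T := L.drop (d - m) with hT
  have hTlen : T.length = m := by
    rw [hT, List.length_drop]
    omega
  have hTne : T ≠ [] := by
    intro h0
    rw [h0] at hTlen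
    simp at hTlen
    omega
  have hsplit : L.take (d - m) ++ T = L := by rw [hT]; exact List.take_append_drop _ _
  have htklen : (L.take (d - m)).length = d - m := by
    rw [List.length_take]
    omega
  have hTlast : T.getLast hTne ≠ 0 := by
    have h1 : L.getLast? = T.getLast? := by
      conv_lhs => rw [← hsplit]
      exact List.getLast?_append_of_ne_nil _ hTne
    rw [List.getLast?_eq_some_getLast hLne, List.getLast?_eq_some_getLast hTne] at h1
    have h2 := Nat.getLast_digit_ne_zero 10 (show n ≠ 0 by omega)
    rw [Option.some_inj] at h1
    rw [← h1]
    exact h2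
  have hTall : ∀ x ∈ T, x < 10 := by
    intro x hx
    exact Nat.digits_lt_base (by norm_num) (List.mem_of_mem_drop (hT ▸ hx))
  set h := Nat.ofDigits 10 T with hh
  have hdigh : Nat.digits 10 h = T :=
    Nat.digits_ofDigits 10 (by norm_num) T hTall (fun _ => hTlast)
  have hh0 : h ≠ 0 := by
    intro h0
    rw [h0] at hdigh
    simp at hdigh
    exact hTne hdigh
  have hhlt : h < 10 ^ m := by
    have := Nat.ofDigits_lt_base_pow_length (b := 10) (l := T) (by norm_num) hTall
    rwa [hTlen] at this
  have hhge : 10 ^ (m - 1) ≤ h := by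
    have hb := Nat.base_pow_length_digits_le 10 h (by norm_num) hh0
    rw [hdigh, hTlen] at hb
    have hp : (10:Nat) ^ m = 10 * 10 ^ (m - 1) := by
      conv_lhs => rw [show m = (m - 1) + 1 by omega]
      ring
    omega
  have hm1' : m - 1 + 1 = m := by omega
  have hnval : n = Nat.ofDigits 10 L := by rw [hL, Nat.ofDigits_digits]
  refine ⟨m - 1, h, hhge, by rwa [hm1'], ?_⟩
  have hLrev : L = T.reverse ++ (L.take (d - m)).reverse := by
    conv_lhs => rw [hrev, ← hsplit]
    rw [List.reverse_append]
  by_cases hpar : d = 2 * m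
  · -- even digit count: n = evenN h (m-1)
    right
    have hdm : d - m = m := by omega
    have htake : L.take (d - m) = T.reverse := by
      have hEq : L.take (d - m) ++ T = T.reverse ++ (L.take (d - m)).reverse := by
        rw [hsplit, ← hLrev]
      exact List.append_inj_left hEq (by rw [htklen, List.length_reverse, hTlen, hdm])
    have hLform : L = T.reverse ++ T := by rw [← hsplit, htake]
    rw [evenN, hm1', revN, hdigh]
    rw [hnval, hLform, Nat.ofDigits_append, List.length_reverse, hTlen]
    rw [← hh]
    ring
  · -- odd digit count: n = oddN h (m-1)
    left
    have hdm : d - m = m - 1 := by omega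
    have hpos : 0 < h := Nat.pos_of_ne_zero hh0
    have htail : Nat.digits 10 (h / 10) = T.tail := by
      have := Nat.digits_def' (by norm_num : (1:Nat) < 10) hpos
      rw [hdigh] at this
      rw [this]
      rfl
    have htake : L.take (d - m) = (T.drop 1).reverse := by
      have h1 : L.take (d - m) = (T.reverse ++ (L.take (d - m)).reverse).take (d - m) := by
        conv_lhs => rw [hLrev]
      rw [h1, List.take_append_of_le_length (by rw [List.length_reverse, hTlen]; omega)]
      rw [List.take_reverse, hTlen, hdm]
      congr 1
      congr 1
      omega
    have hLform : L = (T.drop 1).reverse ++ T := by rw [← hsplit, htake]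
    rw [oddN, revN, htail, ← List.drop_one]
    rw [hnval, hLform, Nat.ofDigits_append, List.length_reverse, List.length_drop, hTlen]
    rw [← hh]
    ring

lemma oddC_natCast (hN k : Nat) : oddC (hN : Int) ((10 : Int) ^ k) = (oddN hN k : Int) := by
  rw [oddC, oddN]
  have hf : PySem.Int.floordiv (hN : Int) 10 = ((hN / 10 : Nat) : Int) := by
    rw [PySem.Int.floordiv_eq_ediv_of_pos (by norm_num)]
    push_cast
    rfl
  rw [hf, rev10_natCast]
  push_cast
  ring

lemma evenC_natCast (hN k : Nat) : evenC (hN : Int) ((10 : Int) ^ k) = (evenN hN k : Int) := by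
  rw [evenC, evenN, rev10_natCast]
  push_cast
  ring

lemma mem_classCands (k : Nat) (x : Int) :
    x ∈ classCands ((10 : Int) ^ k) ↔
      ∃ h : Nat, 10 ^ k ≤ h ∧ h < 10 ^ (k + 1) ∧ (x = (oddN h k : Int) ∨ x = (evenN h k : Int)) := by
  rw [classCands, List.mem_flatMap]
  constructor
  · rintro ⟨hI, hmem, hpair⟩
    rw [PySem.List.mem_pyRange_one] at hmem
    have hpos : (0 : Int) ≤ hI := le_trans (by positivity) hmem.1
    set hN := hI.toNat with hhN
    have hcast : hI = (hN : Int) := by omega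
    refine ⟨hN, ?_, ?_, ?_⟩
    · have := hmem.1
      rw [hcast] at this
      exact_mod_cast this
    · have := hmem.2
      rw [hcast] at this
      have h2 : (hN : Int) < ((10 ^ (k + 1) : Nat) : Int) := by
        push_cast
        calc (hN : Int) < 10 * 10 ^ k := this
          _ = 10 ^ (k + 1) := by ring
      exact_mod_cast h2
    · simp only [List.mem_cons, List.mem_singleton, List.not_mem_nil, or_false] at hpair
      rcases hpair with hp | hp
      · left; rw [hp, hcast, oddC_natCast]
      · right; rw [hp, hcast, evenC_natCast]
  · rintro ⟨hN, hb1, hb2, hOr⟩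
    refine ⟨(hN : Int), ?_, ?_⟩
    · rw [PySem.List.mem_pyRange_one]
      constructor
      · exact_mod_cast hb1
      · have : (hN : Int) < ((10 ^ (k + 1) : Nat) : Int) := by exact_mod_cast hb2
        calc (hN : Int) < ((10 ^ (k + 1) : Nat) : Int) := this
          _ = 10 * 10 ^ k := by push_cast; ring
    · rcases hOr with hp | hp
      · rw [hp, ← oddC_natCast]
        simp
      · rw [hp, ← evenC_natCast]
        simp

lemma mem_candList (H : Int) (j : Nat) (x : Int) :
    x ∈ candList H ((10 : Int) ^ j) ↔
      ∃ k : Nat, j ≤ k ∧ (10 : Int) ^ k < H ∧ x ∈ classCands ((10 : Int) ^ k) := by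
  rw [candList]
  by_cases hc : (10 : Int) ^ j < H
  · rw [dif_pos ⟨one_le_pow₀ (by norm_num), hc⟩]
    rw [List.mem_append]
    rw [show (10 : Int) ^ j * 10 = 10 ^ (j + 1) by ring]
    rw [mem_candList H (j + 1) x]
    constructor
    · rintro (hcl | ⟨k, h1, h2, h3⟩)
      · exact ⟨j, le_refl _, hc, hcl⟩
      · exact ⟨k, by omega, h2, h3⟩
    · rintro ⟨k, h1, h2, h3⟩
      rcases Nat.eq_or_lt_of_le h1 with rfl | hlt
      · exact Or.inl h3
      · exact Or.inr ⟨k, by omega, h2, h3⟩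
  · rw [dif_neg (by intro hcon; exact hc hcon.2)]
    simp only [List.not_mem_nil, false_iff, not_exists]
    rintro k ⟨h1, h2, _⟩
    apply hc
    calc (10 : Int) ^ j ≤ 10 ^ k := by
          apply pow_le_pow_right₀ (by norm_num) h1
      _ < H := h2
termination_by (H - (10 : Int) ^ j).toNat
decreasing_by
  have h1 : (10 : Int) ^ j < 10 ^ (j + 1) := by
    have : (10 : Int) ^ j > 0 := by positivity
    calc (10 : Int) ^ j < 10 ^ j * 10 := by omega
      _ = 10 ^ (j + 1) := by ring
  omega

lemma classCands_bound (k : Nat) (x : Int) (hx : x ∈ classCands ((10 : Int) ^ k)) :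
    ((10 ^ (2 * k) : Nat) : Int) ≤ x ∧ x < ((10 ^ (2 * k + 2) : Nat) : Int) := by
  rw [mem_classCands] at hx
  obtain ⟨h, hb1, hb2, hOr⟩ := hx
  have ho := oddN_bounds h k hb1 hb2
  have he := evenN_bounds h k hb1 hb2
  have hmono : (10 : Nat) ^ (2 * k) ≤ 10 ^ (2 * k + 1) := Nat.pow_le_pow_right (by norm_num) (by omega)
  have hmono2 : (10 : Nat) ^ (2 * k + 1) ≤ 10 ^ (2 * k + 2) := Nat.pow_le_pow_right (by norm_num) (by omega)
  rcases hOr with rfl | rfl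
  · constructor
    · exact_mod_cast ho.1
    · have : oddN h k < 10 ^ (2 * k + 2) := lt_of_lt_of_le ho.2 hmono2
      exact_mod_cast this
  · constructor
    · have : (10 : Nat) ^ (2 * k) ≤ evenN h k := le_trans hmono he.1
      exact_mod_cast this
    · exact_mod_cast he.2

lemma pair_disjoint (k i j : Nat) (hi1 : 10 ^ k ≤ i) (hi2 : i < 10 ^ (k + 1))
    (hj1 : 10 ^ k ≤ j) (hj2 : j < 10 ^ (k + 1)) (hij : i ≠ j) :
    List.Disjoint [((oddN i k : Nat) : Int), (evenN i k : Int)]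
      [((oddN j k : Nat) : Int), (evenN j k : Int)] := by
  have hoi := oddN_bounds i k hi1 hi2
  have hoj := oddN_bounds j k hj1 hj2
  have hei := evenN_bounds i k hi1 hi2
  have hej := evenN_bounds j k hj1 hj2
  have hOO : oddN i k ≠ oddN j k := by
    intro he
    apply hij
    rw [← oddN_div i k hi1 hi2, ← oddN_div j k hj1 hj2, he]
  have hEE : evenN i k ≠ evenN j k := by
    intro he
    apply hij
    rw [← evenN_div i k hi1 hi2, ← evenN_div j k hj1 hj2, he]
  have hOE : oddN i k ≠ evenN j k := by omega
  have hEO : evenN i k ≠ oddN j k := by omega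
  intro a ha hb
  simp only [List.mem_cons, List.mem_singleton, List.not_mem_nil, or_false] at ha hb
  rcases ha with rfl | rfl <;> rcases hb with hb | hb <;>
    [exact hOO (by exact_mod_cast hb); exact hOE (by exact_mod_cast hb);
     exact hEO (by exact_mod_cast hb); exact hEE (by exact_mod_cast hb)]

lemma classCands_nodup (k : Nat) : (classCands ((10 : Int) ^ k)).Nodup := by
  rw [classCands, List.nodup_flatMap]
  constructor
  · intro hI hmem
    rw [PySem.List.mem_pyRange_one] at hmem
    have hpos : (0 : Int) ≤ hI := le_trans (by positivity) hmem.1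
    have hcast : hI = (hI.toNat : Int) := by omega
    set hN := hI.toNat
    have hb1 : 10 ^ k ≤ hN := by
      have := hmem.1; rw [hcast] at this; exact_mod_cast this
    have hb2 : hN < 10 ^ (k + 1) := by
      have := hmem.2
      rw [hcast] at this
      have h2 : (hN : Int) < ((10 ^ (k + 1) : Nat) : Int) := by
        push_cast
        calc (hN : Int) < 10 * 10 ^ k := this
          _ = 10 ^ (k + 1) := by ring
      exact_mod_cast h2
    have ho := oddN_bounds hN k hb1 hb2
    have he := evenN_bounds hN k hb1 hb2
    rw [hcast, oddC_natCast, evenC_natCast]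
    simp only [List.nodup_cons, List.mem_singleton, List.not_mem_nil, not_false_iff,
      List.nodup_nil, and_true]
    intro hcon
    have : oddN hN k = evenN hN k := by exact_mod_cast hcon
    omega
  · have hpw := PySem.List.pairwise_lt_pyRange_one (a := (10 : Int) ^ k) (b := 10 * 10 ^ k)
    refine List.Pairwise.imp_of_mem ?_ hpw
    intro a b ha hb hab
    simp only [Function.onFun]
    rw [PySem.List.mem_pyRange_one] at ha hb
    have hapos : (0 : Int) ≤ a := le_trans (by positivity) ha.1
    have hbpos : (0 : Int) ≤ b := le_trans (by positivity) hb.1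
    have hacast : a = (a.toNat : Int) := by omega
    have hbcast : b = (b.toNat : Int) := by omega
    have hab1 : 10 ^ k ≤ a.toNat := by
      have := ha.1; rw [hacast] at this; exact_mod_cast this
    have hab2 : a.toNat < 10 ^ (k + 1) := by
      have := ha.2
      rw [hacast] at this
      have h2 : ((a.toNat : Nat) : Int) < ((10 ^ (k + 1) : Nat) : Int) := by
        push_cast
        calc ((a.toNat : Nat) : Int) < 10 * 10 ^ k := this
          _ = 10 ^ (k + 1) := by ring
      exact_mod_cast h2
    have hbb1 : 10 ^ k ≤ b.toNat := by
      have := hb.1; rw [hbcast] at this; exact_mod_cast this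
    have hbb2 : b.toNat < 10 ^ (k + 1) := by
      have := hb.2
      rw [hbcast] at this
      have h2 : ((b.toNat : Nat) : Int) < ((10 ^ (k + 1) : Nat) : Int) := by
        push_cast
        calc ((b.toNat : Nat) : Int) < 10 * 10 ^ k := this
          _ = 10 ^ (k + 1) := by ring
      exact_mod_cast h2
    have hne : a.toNat ≠ b.toNat := by omega
    have := pair_disjoint k a.toNat b.toNat hab1 hab2 hbb1 hbb2 hne
    rw [hacast, hbcast, oddC_natCast, evenC_natCast, oddC_natCast, evenC_natCast]
    exact this

lemma candList_nodup (H : Int) (j : Nat) :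
    (candList H ((10 : Int) ^ j)).Nodup := by
  rw [candList]
  by_cases hc : (10 : Int) ^ j < H
  · rw [dif_pos ⟨one_le_pow₀ (by norm_num), hc⟩]
    rw [List.nodup_append]
    refine ⟨classCands_nodup j, ?_, ?_⟩
    · rw [show (10 : Int) ^ j * 10 = 10 ^ (j + 1) by ring]
      exact candList_nodup H (j + 1)
    · intro a ha b hb
      rw [show (10 : Int) ^ j * 10 = 10 ^ (j + 1) by ring] at hb
      have h1 := (classCands_bound j a ha).2
      rw [mem_candList] at hb
      obtain ⟨k, hk1, _, hk3⟩ := hb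
      have h2 := (classCands_bound k b hk3).1
      have hmono : (10 : Nat) ^ (2 * j + 2) ≤ 10 ^ (2 * k) :=
        Nat.pow_le_pow_right (by norm_num) (by omega)
      have hcast : ((10 ^ (2 * j + 2) : Nat) : Int) ≤ ((10 ^ (2 * k) : Nat) : Int) := by exact_mod_cast hmono
      omega
  · rw [dif_neg (by intro hcon; exact hc hcon.2)]
    exact List.nodup_nil
termination_by (H - (10 : Int) ^ j).toNat
decreasing_by
  have h1 : (10 : Int) ^ j < 10 ^ (j + 1) := by
    have : (10 : Int) ^ j > 0 := by positivity
    calc (10 : Int) ^ j < 10 ^ j * 10 := by omega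
      _ = 10 ^ (j + 1) := by ring
  omega

-- the central counting identity
lemma count_eq (lo hi : Int) :
    ((PySem.List.pyRange lo hi 1).countP (fun i => palindromeA i && palindromeA (i * i)) : Int)
      = (if hitsB lo hi 0 then (1 : Int) else 0)
        + ((candList (growH hi 1 one_pos) 1).countP (hitsB lo hi) : Int) := by
  obtain ⟨⟨K, hK⟩, hHsq⟩ := growH_spec hi 1 one_pos
  set H := growH hi 1 one_pos with hHdef
  rw [one_mul] at hK
  have hc1 : candList H (1 : Int) = candList H ((10 : Int) ^ (0 : Nat)) := by norm_num
  rw [hc1]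
  have hcand0 : (0 : Int) ∉ candList H ((10 : Int) ^ (0 : Nat)) := by
    intro hmem
    rw [mem_candList] at hmem
    obtain ⟨k, _, _, hk3⟩ := hmem
    have := (classCands_bound k 0 hk3).1
    have hp : (0 : Nat) < 10 ^ (2 * k) := Nat.pow_pos (by norm_num)
    omega
  have hnodup2 : ((0 : Int) :: candList H ((10 : Int) ^ (0 : Nat))).Nodup := by
    rw [List.nodup_cons]
    exact ⟨hcand0, candList_nodup H 0⟩
  have hnodup1 : ((PySem.List.pyRange lo hi 1).filter
      (fun i => palindromeA i && palindromeA (i * i))).Nodup :=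
    (PySem.List.nodup_pyRange_one lo hi).filter _
  have hmemiff : ∀ a : Int,
      (a ∈ (PySem.List.pyRange lo hi 1).filter (fun i => palindromeA i && palindromeA (i * i)))
        ↔ (a ∈ ((0 : Int) :: candList H ((10 : Int) ^ (0 : Nat))).filter (hitsB lo hi)) := by
    intro a
    rw [List.mem_filter, List.mem_filter, PySem.List.mem_pyRange_one]
    constructor
    · rintro ⟨⟨hlo, hhi⟩, hP⟩
      rw [Bool.and_eq_true, palindromeA_eq, palindromeA_eq, Bool.and_eq_true, Bool.and_eq_true] at hP
      obtain ⟨⟨ha0, hpal⟩, ⟨_, hpalsq⟩⟩ := hP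
      have ha0' : 0 ≤ a := of_decide_eq_true ha0
      refine ⟨?_, ?_⟩
      · by_cases haz : a = 0
        · rw [haz]; exact List.mem_cons_self
        · apply List.mem_cons_of_mem
          have hapos : 0 < a.toNat := by omega
          obtain ⟨k, h, hb1, hb2, hOr⟩ := pal_surj a.toNat hapos hpal
          have hlow : ((10 ^ (2 * k) : Nat) : Int) ≤ a := by
            have hcast : a = (a.toNat : Int) := by omega
            rcases hOr with hv | hv
            · have := (oddN_bounds h k hb1 hb2).1
              rw [hcast, hv]; exact_mod_cast this
            · have h1 := (evenN_bounds h k hb1 hb2).1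
              have h2 : (10 : Nat) ^ (2 * k) ≤ 10 ^ (2 * k + 1) :=
                Nat.pow_le_pow_right (by norm_num) (by omega)
              rw [hcast, hv]
              exact_mod_cast le_trans h2 h1
          have hkK : k < K := by
            have hup : a < ((10 ^ (2 * K) : Nat) : Int) := by
              calc a < hi := hhi
                _ ≤ H * H := hHsq
                _ = 10 ^ K * 10 ^ K := by rw [hK]
                _ = ((10 ^ (2 * K) : Nat) : Int) := by push_cast; ring
            have : (10 : Nat) ^ (2 * k) < 10 ^ (2 * K) := by
              have := lt_of_le_of_lt hlow hup
              exact_mod_cast this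
            have := (Nat.pow_lt_pow_iff_right (by norm_num : 1 < 10)).mp this
            omega
          rw [mem_candList]
          refine ⟨k, Nat.zero_le _, ?_, ?_⟩
          · rw [hK]
            exact pow_lt_pow_right₀ (by norm_num) hkK
          · rw [mem_classCands]
            refine ⟨h, hb1, hb2, ?_⟩
            have hcast : a = (a.toNat : Int) := by omega
            rcases hOr with hv | hv
            · left; rw [hcast, hv]
            · right; rw [hcast, hv]
      · rw [hitsB_eq, Bool.and_eq_true, Bool.and_eq_true]
        exact ⟨⟨decide_eq_true hlo, decide_eq_true hhi⟩, hpalsq⟩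
    · rintro ⟨hmem, hq⟩
      rw [hitsB_eq, Bool.and_eq_true, Bool.and_eq_true] at hq
      obtain ⟨⟨hlo, hhi⟩, hpalsq⟩ := hq
      have hlo' : lo ≤ a := of_decide_eq_true hlo
      have hhi' : a < hi := of_decide_eq_true hhi
      refine ⟨⟨hlo', hhi'⟩, ?_⟩
      have hapal : decide (0 ≤ a) = true ∧ palN a.toNat = true := by
        rcases List.mem_cons.mp hmem with rfl | hmem'
        · exact ⟨by decide, by decide⟩
        · rw [mem_candList] at hmem'
          obtain ⟨k, _, _, hk3⟩ := hmem'
          rw [mem_classCands] at hk3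
          obtain ⟨h, hb1, hb2, hOr⟩ := hk3
          rcases hOr with rfl | rfl
          · refine ⟨decide_eq_true (by positivity), ?_⟩
            rw [Int.toNat_natCast]
            exact palN_oddN h k hb1 hb2
          · refine ⟨decide_eq_true (by positivity), ?_⟩
            rw [Int.toNat_natCast]
            exact palN_evenN h k hb1 hb2
      rw [Bool.and_eq_true, palindromeA_eq, palindromeA_eq, Bool.and_eq_true, Bool.and_eq_true]
      refine ⟨hapal, decide_eq_true (mul_self_nonneg a), hpalsq⟩
  have hperm : List.Perm
      ((PySem.List.pyRange lo hi 1).filter (fun i => palindromeA i && palindromeA (i * i)))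
      (((0 : Int) :: candList H ((10 : Int) ^ (0 : Nat))).filter (hitsB lo hi)) := by
    apply List.perm_of_nodup_nodup_toFinset_eq hnodup1 (hnodup2.filter _)
    apply Finset.ext
    intro a
    rw [List.mem_toFinset, List.mem_toFinset]
    exact hmemiff a
  have hlen := hperm.length_eq
  rw [← List.countP_eq_length_filter, ← List.countP_eq_length_filter] at hlen
  rw [hlen, List.countP_cons]
  rcases Bool.eq_false_or_eq_true (hitsB lo hi 0) with hb | hb <;>
    simp [hb] <;> push_cast <;> ring

-- ===== VERDICT (by name: the statement is the Claim_ definition above) =====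
theorem fands_spec : Claim_equal_fands := by
  intro range_values _ hpre
  unfold Spec_fands
  rw [fands_eq_countP, count_eq]
  rw [fands_alt.eq_def]
  rw [classLoop_eq]
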